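-- pv_equiv track=rewrite | github.com/narratorai/py-queryparser | queryParser.py | replace_space_in_quotes
-- ===== SOURCE A (Python) =====
-- def replace_space_in_quotes(text):
-- 	new_text = []
-- 	in_quotes=False
-- 	for t in text:
-- 		if t == "'":
-- 			in_quotes = not in_quotes
--
-- 		if in_quotes and t == ' ':
-- 			new_text.append('--')
-- 		elif not in_quotes and t in ('(', ')', ','):
-- 			new_text.append(' {} '.format(t))
-- 		else:
-- 			new_text.append(t)
--
-- 	return ''.join(new_text)
-- ===== SOURCE B (Python) =====
-- def replace_space_in_quotes(text):
-- 	segments = text.split("'")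
-- 	processed = []
-- 	for i, seg in enumerate(segments):
-- 		if i % 2 == 1:
-- 			processed.append(seg.replace(' ', '--'))
-- 		else:
-- 			processed.append(seg.replace('(', ' ( ').replace(')', ' ) ').replace(',', ' , '))
-- 	return "'".join(processed)
-- ===== Notes on version B (the rewrite author's own statement) =====
-- stated objective: faster
-- what changed: A's single stateful per-character loop with an in_quotes toggle is replaced by splitting the text on the quote character and processing whole segments by index parity (odd segments: spaces become double dashes; even segments: parentheses and commas get padded with spaces), then rejoining the segments with the quote character.
import Mathlib
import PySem

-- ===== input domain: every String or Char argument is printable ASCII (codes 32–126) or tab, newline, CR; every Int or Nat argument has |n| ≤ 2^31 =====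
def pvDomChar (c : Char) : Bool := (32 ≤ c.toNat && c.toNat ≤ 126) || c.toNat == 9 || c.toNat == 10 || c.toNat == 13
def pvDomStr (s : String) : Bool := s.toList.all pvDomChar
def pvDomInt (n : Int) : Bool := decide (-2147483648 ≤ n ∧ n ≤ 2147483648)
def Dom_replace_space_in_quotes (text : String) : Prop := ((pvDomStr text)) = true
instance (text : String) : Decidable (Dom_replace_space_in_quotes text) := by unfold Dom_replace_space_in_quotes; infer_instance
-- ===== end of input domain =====

-- B replaces A's stateful in_quotes character loop by splitting on the quote char and
-- processing even/odd segments with targeted replaces (objective: alternative decomposition).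

-- ===== PORT A =====
-- literal port of A: one pass over the characters with an in_quotes toggle,
-- appending per-character strings (as List Char) and joining with ''.
def replace_space_in_quotes (text : String) : String :=
  let r := text.toList.foldl
    (fun (st : List (List Char) × Bool) (t : Char) =>
      let in_quotes := if t == '\'' then !st.2 else st.2
      if in_quotes && t == ' ' then (st.1 ++ [['-', '-']], in_quotes)
      else if !in_quotes && (t == '(' || t == ')' || t == ',') then
        (st.1 ++ [[' ', t, ' ']], in_quotes)
      else (st.1 ++ [[t]], in_quotes))
    ([], false)
  String.ofList (PySem.Chars.join [] r.1)

-- ===== PORT B =====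
-- literal port of Source B: split on "'", odd segments get ' '→'--', even segments get
-- the three chained punctuation-padding replaces, join back with "'".
def replace_space_in_quotes_alt (text : String) : String :=
  let segments := PySem.Chars.splitOn text.toList ['\'']
  let processed := (PySem.List.enumerate segments).map (fun p =>
    if p.1 % 2 == 1 then PySem.Chars.replace p.2 [' '] ['-', '-']
    else PySem.Chars.replace
          (PySem.Chars.replace
            (PySem.Chars.replace p.2 ['('] [' ', '(', ' '])
            [')'] [' ', ')', ' '])
          [','] [' ', ',', ' '])
  String.ofList (PySem.Chars.join ['\''] processed)

-- ===== PRECONDITION & SPEC =====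
def Spec_replace_space_in_quotes (text : String) (out : String) : Prop := out = replace_space_in_quotes_alt text
instance (text : String) (out : String) : Decidable (Spec_replace_space_in_quotes text out) := by unfold Spec_replace_space_in_quotes; infer_instance

-- ===== CLAIM (what is proved, stated in full; the proofs are below) =====
def Claim_equal_replace_space_in_quotes : Prop := ∀ (text : String), Dom_replace_space_in_quotes text → Spec_replace_space_in_quotes text (replace_space_in_quotes text)

-- ===== LEMMAS AND PROOFS =====

-- per-character replacement applied inside quote segments (B's ' '→'--')
def pvDash (c : Char) : List Char := if c = ' ' then ['-', '-'] else [c]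

-- per-character replacement applied outside quote segments (B's punctuation padding)
def pvPad (c : Char) : List Char :=
  if c = '(' ∨ c = ')' ∨ c = ',' then [' ', c, ' '] else [c]

-- structural split on the quote character (always returns ≥ 1 segment)
def pvSplit : List Char → List (List Char)
  | [] => [[]]
  | c :: cs =>
    if c = '\'' then [] :: pvSplit cs
    else
      match pvSplit cs with
      | [] => [[c]]
      | s :: rest => (c :: s) :: rest

lemma pvSplit_ne_nil (l : List Char) : pvSplit l ≠ [] := by
  cases l with
  | nil => simp [pvSplit]
  | cons c cs =>
    simp only [pvSplit]
    split_ifs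
    · simp
    · cases h : pvSplit cs <;> simp

lemma pvSplit_exists_cons (l : List Char) : ∃ s r, pvSplit l = s :: r := by
  cases h : pvSplit l with
  | nil => exact absurd h (pvSplit_ne_nil l)
  | cons s r => exact ⟨s, r, rfl⟩

-- the per-character emission of A's loop body, as a function of the (post-toggle) state
def pvEmit (b : Bool) (c : Char) : List Char :=
  if b then pvDash c else pvPad c

-- A's emitted pieces from state b
def pvPieces (b : Bool) : List Char → List (List Char)
  | [] => []
  | c :: cs =>
    let nb := if c == '\'' then !b else b
    (if nb && c == ' ' then ['-', '-']
     else if !nb && (c == '(' || c == ')' || c == ',') then [' ', c, ' ']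
     else [c]) :: pvPieces nb cs

-- B's join of processed segments, starting with parity b
def pvBJoin (b : Bool) : List (List Char) → List Char
  | [] => []
  | [s] => (if b then s.flatMap pvDash else s.flatMap pvPad)
  | s :: s' :: rest =>
    (if b then s.flatMap pvDash else s.flatMap pvPad) ++ '\'' :: pvBJoin (!b) (s' :: rest)

lemma pvBJoin_cons_cons (b : Bool) (c : Char) (s : List Char) (rest : List (List Char)) :
    pvBJoin b ((c :: s) :: rest) = pvEmit b c ++ pvBJoin b (s :: rest) := by
  cases rest with
  | nil => cases b <;> simp [pvBJoin, pvEmit]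
  | cons s' r => cases b <;> simp [pvBJoin, pvEmit]

-- A's head piece equals pvEmit
lemma pvHead_eq (b : Bool) (c : Char) :
    (if b && c == ' ' then ['-', '-']
     else if !b && (c == '(' || c == ')' || c == ',') then [' ', c, ' ']
     else [c]) = pvEmit b c := by
  cases b <;> simp [pvEmit, pvDash, pvPad, beq_iff_eq, or_assoc]

-- splitOn with the one-character quote separator is pvSplit
lemma splitOn_go_singleton :
    ∀ (l : List Char) (fuel : Nat) (cur : List Char) (acc : List (List Char)),
      l.length ≤ fuel →
      PySem.Chars.splitOn.go ['\''] fuel l cur acc =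
        acc.reverse ++
          ((cur.reverse ++ (pvSplit l).headI) :: (pvSplit l).tail) := by
  intro l
  induction l with
  | nil =>
    intro fuel cur acc _
    cases fuel <;> simp [PySem.Chars.splitOn.go, pvSplit]
  | cons c rest ih =>
    intro fuel cur acc hle
    obtain ⟨f, rfl⟩ : ∃ f, fuel = f + 1 := by
      cases fuel with
      | zero => simp at hle
      | succ f => exact ⟨f, rfl⟩
    have hf : rest.length ≤ f := by simp at hle; omega
    obtain ⟨s, r, hsr⟩ := pvSplit_exists_cons rest
    by_cases hc : c = '\''
    · subst hc
      have hpre : (['\''].isPrefixOf ('\'' :: rest)) = true := by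
        simp [List.isPrefixOf]
      simp only [PySem.Chars.splitOn.go, hpre, if_true, List.drop_succ_cons,
        List.length_cons, List.length_nil, List.drop_zero]
      rw [ih f [] (cur.reverse :: acc) hf]
      simp [pvSplit, hsr]
    · have hpre : (['\''].isPrefixOf (c :: rest)) = false := by
        simp [List.isPrefixOf]
        exact fun h => hc h.symm
      simp only [PySem.Chars.splitOn.go, hpre, Bool.false_eq_true, if_false]
      rw [ih f (c :: cur) acc hf]
      simp [pvSplit, hc, hsr]

lemma splitOn_singleton (l : List Char) :
    PySem.Chars.splitOn l ['\''] = pvSplit l := by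
  unfold PySem.Chars.splitOn
  rw [splitOn_go_singleton l (l.length + 1) [] [] (by omega)]
  obtain ⟨s, r, hsr⟩ := pvSplit_exists_cons l
  simp [hsr]

-- replace with a one-character pattern is a flatMap
lemma replace_go_singleton (o : Char) (new : List Char) :
    ∀ (l : List Char) (fuel : Nat) (acc : List Char),
      l.length ≤ fuel →
      PySem.Chars.replace.go [o] new fuel l acc =
        acc.reverse ++ l.flatMap (fun c => if c = o then new else [c]) := by
  intro l
  induction l with
  | nil =>
    intro fuel acc _
    cases fuel <;> simp [PySem.Chars.replace.go]
  | cons c rest ih =>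
    intro fuel acc hle
    obtain ⟨f, rfl⟩ : ∃ f, fuel = f + 1 := by
      cases fuel with
      | zero => simp at hle
      | succ f => exact ⟨f, rfl⟩
    have hf : rest.length ≤ f := by simp at hle; omega
    by_cases hc : c = o
    · subst hc
      have hpre : ([c].isPrefixOf (c :: rest)) = true := by simp [List.isPrefixOf]
      simp only [PySem.Chars.replace.go, hpre, if_true, List.drop_succ_cons,
        List.length_cons, List.length_nil, List.drop_zero]
      rw [ih f (new.reverse ++ acc) hf]
      simp
    · have hpre : ([o].isPrefixOf (c :: rest)) = false := by
        simp [List.isPrefixOf]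
        exact fun h => hc h.symm
      simp only [PySem.Chars.replace.go, hpre, Bool.false_eq_true, if_false]
      rw [ih f (c :: acc) hf]
      simp [hc]

lemma replace_singleton (l : List Char) (o : Char) (new : List Char) :
    PySem.Chars.replace l [o] new =
      l.flatMap (fun c => if c = o then new else [c]) := by
  unfold PySem.Chars.replace
  rw [if_neg (by simp)]
  rw [replace_go_singleton o new l l.length []]
  · simp
  · omega

lemma flatMap_comp3 (l : List Char) (f g h k : Char → List Char)
    (hk : ∀ c, ((f c).flatMap g).flatMap h = k c) :
    ((l.flatMap f).flatMap g).flatMap h = l.flatMap k := by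
  induction l with
  | nil => simp
  | cons c t ih =>
    simp only [List.flatMap_cons, List.flatMap_append, ih]
    rw [hk]

lemma pvPad_chain (c : Char) :
    ((if c = '(' then [' ', '(', ' '] else [c]).flatMap
        (fun d => if d = ')' then [' ', ')', ' '] else [d])).flatMap
        (fun d => if d = ',' then [' ', ',', ' '] else [d]) = pvPad c := by
  by_cases h1 : c = '('
  · subst h1; decide
  · by_cases h2 : c = ')'
    · subst h2; decide
    · by_cases h3 : c = ','
      · subst h3; decide
      · simp [h1, h2, h3, pvPad]

-- B's three chained replaces collapse to one flatMap of pvPad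
lemma triple_replace_eq (s : List Char) :
    PySem.Chars.replace
        (PySem.Chars.replace
          (PySem.Chars.replace s ['('] [' ', '(', ' '])
          [')'] [' ', ')', ' '])
        [','] [' ', ',', ' '] = s.flatMap pvPad := by
  rw [replace_singleton, replace_singleton, replace_singleton]
  exact flatMap_comp3 _ _ _ _ _ pvPad_chain

lemma dash_replace_eq (s : List Char) :
    PySem.Chars.replace s [' '] ['-', '-'] = s.flatMap pvDash := by
  rw [replace_singleton]
  rfl

-- A's fold accumulates pieces
lemma foldA_pieces :
    ∀ (l : List Char) (acc : List (List Char)) (b : Bool),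
      (l.foldl
        (fun (st : List (List Char) × Bool) (t : Char) =>
          let in_quotes := if t == '\'' then !st.2 else st.2
          if in_quotes && t == ' ' then (st.1 ++ [['-', '-']], in_quotes)
          else if !in_quotes && (t == '(' || t == ')' || t == ',') then
            (st.1 ++ [[' ', t, ' ']], in_quotes)
          else (st.1 ++ [[t]], in_quotes))
        (acc, b)).1 = acc ++ pvPieces b l := by
  intro l
  induction l with
  | nil => intro acc b; simp [pvPieces]
  | cons c t ih =>
    intro acc b
    simp only [List.foldl_cons, pvPieces]
    split_ifs <;> rw [ih] <;> simp

lemma intercalate_cons_cons' (sep a b : List Char) (r : List (List Char)) :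
    List.intercalate sep (a :: b :: r) = a ++ sep ++ List.intercalate sep (b :: r) := by
  simp only [List.intercalate, List.intersperse, List.flatten]
  simp

lemma join_nil_eq_flatten (parts : List (List Char)) :
    PySem.Chars.join [] parts = parts.flatten := by
  induction parts with
  | nil => simp [PySem.Chars.join, List.intercalate, List.intersperse]
  | cons s r ih =>
    cases r with
    | nil => simp [PySem.Chars.join, List.intercalate, List.intersperse]
    | cons b r' =>
      simp only [PySem.Chars.join] at ih ⊢
      rw [intercalate_cons_cons', ih]
      simp

-- the bridge: A's flattened pieces equal B's alternating join of the split
lemma pieces_eq_bjoin :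
    ∀ (l : List Char) (b : Bool),
      (pvPieces b l).flatten = pvBJoin b (pvSplit l) := by
  intro l
  induction l with
  | nil => intro b; cases b <;> simp [pvPieces, pvSplit, pvBJoin]
  | cons c t ih =>
    intro b
    by_cases hc : c = '\''
    · subst hc
      obtain ⟨s, r, hsr⟩ := pvSplit_exists_cons t
      have hq : (('\'' : Char) == '\'') = true := by decide
      simp only [pvPieces, pvSplit, hq, if_true, hsr, List.flatten_cons]
      rw [pvHead_eq]
      have hh : pvEmit (!b) '\'' = ['\''] := by cases b <;> decide
      rw [hh]
      cases b <;> simp [pvBJoin, ih, hsr]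
    · obtain ⟨s, r, hsr⟩ := pvSplit_exists_cons t
      have hq : ((c : Char) == '\'') = false := by simp [hc]
      simp only [pvPieces, pvSplit, hq, if_false, hsr, hc,
        List.flatten_cons, pvHead_eq]
      rw [pvBJoin_cons_cons, ih, hsr]
      simp

-- B's enumerate-map-join equals pvBJoin of the segments, with the index parity as state
lemma bjoin_go (segs : List (List Char)) :
    ∀ (i : Int), 0 ≤ i →
      PySem.Chars.join ['\'']
        ((PySem.List.enumerate segs i).map (fun p =>
          if p.1 % 2 == 1 then PySem.Chars.replace p.2 [' '] ['-', '-']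
          else PySem.Chars.replace
                (PySem.Chars.replace
                  (PySem.Chars.replace p.2 ['('] [' ', '(', ' '])
                  [')'] [' ', ')', ' '])
                [','] [' ', ',', ' '])) = pvBJoin (i % 2 == 1) segs := by
  induction segs with
  | nil =>
    intro i _
    simp [PySem.List.enumerate, PySem.Chars.join, List.intercalate, pvBJoin]
  | cons s rest ih =>
    intro i hi
    cases rest with
    | nil =>
      simp only [PySem.List.enumerate, List.map_cons, List.map_nil]
      have h1 : ∀ x : List Char, PySem.Chars.join ['\''] [x] = x := by
        intro x; simp [PySem.Chars.join, List.intercalate, List.intersperse]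
      rw [h1]
      by_cases hp : i % 2 = 1
      · simp [pvBJoin, hp, dash_replace_eq]
      · have h0 : (i % 2 == 1) = false := by simp [hp]
        simp [pvBJoin, h0, triple_replace_eq]
    | cons s' r =>
      have ht := ih (i + 1) (by omega)
      have hpar : ((i + 1) % 2 == 1) = !(i % 2 == 1) := by
        by_cases hp : i % 2 = 1
        · have h1 : (i + 1) % 2 = 0 := by omega
          simp [hp, h1]
        · have h0 : i % 2 = 0 := by omega
          have h1 : (i + 1) % 2 = 1 := by omega
          simp [h0, h1]
      rw [hpar] at ht
      simp only [PySem.List.enumerate, List.map_cons, PySem.Chars.join] at ht ⊢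
      rw [intercalate_cons_cons', ht]
      by_cases hp : i % 2 = 1
      · simp [pvBJoin, hp, dash_replace_eq]
      · have h0 : i % 2 = 0 := by omega
        simp [pvBJoin, h0, triple_replace_eq]

-- B's processed list joined is pvBJoin false
lemma bjoin_of_processed (segs : List (List Char)) :
    segs ≠ [] →
    PySem.Chars.join ['\'']
      ((PySem.List.enumerate segs).map (fun p =>
        if p.1 % 2 == 1 then PySem.Chars.replace p.2 [' '] ['-', '-']
        else PySem.Chars.replace
              (PySem.Chars.replace
                (PySem.Chars.replace p.2 ['('] [' ', '(', ' '])
                [')'] [' ', ')', ' '])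
              [','] [' ', ',', ' '])) = pvBJoin false segs := by
  intro _
  have := bjoin_go segs 0 (by omega)
  simpa using this

-- ===== VERDICT (by name: the statement is the Claim_ definition above) =====
theorem replace_space_in_quotes_spec : Claim_equal_replace_space_in_quotes := by
  intro text _
  unfold Spec_replace_space_in_quotes replace_space_in_quotes replace_space_in_quotes_alt
  simp only [foldA_pieces, List.nil_append, join_nil_eq_flatten, splitOn_singleton,
    bjoin_of_processed _ (pvSplit_ne_nil _), pieces_eq_bjoin]
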